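-- pv_equiv track=rewrite | github.com/jgforhan/cryptography | helpers.py | _bin_expand
-- ===== SOURCE A (Python) =====
-- def _bin_expand(exponent):
--     # From least to most significant
--     bits = list()
--     if exponent == 0:
--         return [0]
--     while (exponent > 0):
--         if exponent % 2 == 0:
--             bits.append(0)
--         else:
--             bits.append(1)
--             exponent -= 1
--         exponent //= 2
--     return bits
-- ===== SOURCE B (Python) =====
-- def _bin_expand(exponent):
--     # bits from the built-in binary string, reversed to least-significant-first
--     return [int(c) for c in bin(exponent)[2:]][::-1]
-- ===== Notes on version B (the rewrite author's own statement) =====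
-- stated objective: idiomatic
-- what changed: B replaces A's repeated-division accumulation loop by parsing Python's built-in bin() string and reversing it.
-- outside the precondition, e.g. on _bin_expand(-3): A returns [], B raises ValueError
import Mathlib
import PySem

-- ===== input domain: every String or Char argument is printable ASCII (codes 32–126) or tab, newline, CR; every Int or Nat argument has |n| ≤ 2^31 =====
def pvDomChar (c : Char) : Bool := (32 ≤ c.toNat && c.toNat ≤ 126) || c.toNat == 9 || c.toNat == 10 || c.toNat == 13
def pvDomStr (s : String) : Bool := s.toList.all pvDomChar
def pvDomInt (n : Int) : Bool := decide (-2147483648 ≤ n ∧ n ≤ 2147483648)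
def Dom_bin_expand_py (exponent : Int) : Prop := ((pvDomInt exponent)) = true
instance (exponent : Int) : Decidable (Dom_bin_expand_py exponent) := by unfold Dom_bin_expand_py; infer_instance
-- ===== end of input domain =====

-- B computes the bits by parsing Python's built-in bin() string and reversing it,
-- instead of A's repeated-division loop (idiomatic rewrite, same asymptotic cost).


-- ===== PORT A =====
-- the while loop of A: state is (exponent, bits)
def binLoopA (e : Int) (bits : List Int) : List Int :=
  if h : 0 < e then
    if PySem.Int.mod e 2 = 0 then
      binLoopA (PySem.Int.floordiv e 2) (bits ++ [0])
    else
      binLoopA (PySem.Int.floordiv (e - 1) 2) (bits ++ [1])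
  else bits
termination_by e.toNat
decreasing_by
  · rw [PySem.Int.floordiv_eq_ediv_of_pos (by omega)]; omega
  · rw [PySem.Int.floordiv_eq_ediv_of_pos (by omega)]; omega

def bin_expand_py (exponent : Int) : List Int :=
  if exponent = 0 then [0] else binLoopA exponent []

-- ===== PORT B =====
-- int(c) for a single character; total via getD 0 — exact on the digit chars bin() produces
def parseBitChar (c : Char) : Int := (PySem.Int.ofChars? [c]).getD 0

-- [int(c) for c in bin(exponent)[2:]][::-1]
def bin_expand_py_alt (exponent : Int) : List Int :=
  (PySem.List.slice? ((PySem.List.slice (PySem.Int.toBinChars0b exponent) (some 2) none).map parseBitChar)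
      none none (-1)).getD []

-- ===== PRECONDITION & SPEC =====
-- Pre_ excludes negative exponents, on which A returns [] (the loop never runs) while
-- B raises ValueError (int('b') on the sign-carrying bin() string).
def Pre_bin_expand_py (exponent : Int) : Prop := 0 ≤ exponent
instance (exponent : Int) : Decidable (Pre_bin_expand_py exponent) := by unfold Pre_bin_expand_py; infer_instance
def pvWitness_bin_expand_py : Int := (6)

def Spec_bin_expand_py (exponent : Int) (out : List Int) : Prop := out = bin_expand_py_alt exponent
instance (exponent : Int) (out : List Int) : Decidable (Spec_bin_expand_py exponent out) := by unfold Spec_bin_expand_py; infer_instance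

-- ===== CLAIM (what is proved, stated in full; the proofs are below) =====
def Claim_equal_bin_expand_py : Prop := ∀ (exponent : Int), Dom_bin_expand_py exponent → Pre_bin_expand_py exponent → Spec_bin_expand_py exponent (bin_expand_py exponent)

-- ===== LEMMAS AND PROOFS =====

-- proof-side spec: most-significant-first bits of a positive Nat
def msbBits (n : Nat) : List Int :=
  if _h : n < 2 then [(n : Int)] else msbBits (n / 2) ++ [((n % 2 : Nat) : Int)]
termination_by n
decreasing_by omega

lemma binLoopA_eq (n : Nat) (bits : List Int) (hn : 0 < n) :
    binLoopA (n : Int) bits = bits ++ (msbBits n).reverse := by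
  induction n using Nat.strong_induction_on generalizing bits with
  | _ n ih =>
    rw [binLoopA]
    simp only [Int.natCast_pos.mpr hn, dif_pos]
    rcases Nat.lt_or_ge n 2 with h2 | h2
    · have h1 : n = 1 := by omega
      subst h1
      rw [if_neg (by decide)]
      simp only [Nat.cast_one]
      rw [show PySem.Int.floordiv ((1 : Int) - 1) 2 = 0 from by decide, binLoopA, msbBits]
      norm_num
    · conv_rhs => rw [msbBits]
      rw [dif_neg (by omega : ¬ n < 2)]
      rcases Nat.mod_two_eq_zero_or_one n with hmod | hmod
      · have hm : PySem.Int.mod (n : Int) 2 = 0 := by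
          rw [PySem.Int.mod_eq_emod_of_pos (by omega)]; omega
        have hfd : PySem.Int.floordiv (n : Int) 2 = ((n / 2 : Nat) : Int) := by
          exact_mod_cast PySem.Int.floordiv_natCast n 2
        rw [if_pos hm, hfd, ih (n / 2) (by omega) _ (by omega)]
        simp [hmod]
      · have hm : ¬ PySem.Int.mod (n : Int) 2 = 0 := by
          rw [PySem.Int.mod_eq_emod_of_pos (by omega)]; omega
        have hc : ((n : Int) - 1) = ((n - 1 : Nat) : Int) := by omega
        have hfd : PySem.Int.floordiv ((n : Int) - 1) 2 = ((n / 2 : Nat) : Int) := by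
          rw [hc]
          rw [show ((2 : Int) = ((2 : Nat) : Int)) from rfl, PySem.Int.floordiv_natCast]
          congr 1
          omega
        rw [if_neg hm, hfd, ih (n / 2) (by omega) _ (by omega)]
        simp [hmod]

lemma toDigitsCore_parse (f : Nat) :
    ∀ (n : Nat) (cs : List Char), 0 < n → n < 2 ^ f →
      (Nat.toDigitsCore 2 f n cs).map parseBitChar = msbBits n ++ cs.map parseBitChar := by
  induction f with
  | zero => intro n cs hn hf; omega
  | succ f ih =>
    intro n cs hn hf
    rw [Nat.toDigitsCore]
    rcases Nat.lt_or_ge n 2 with h2 | h2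
    · have h1 : n = 1 := by omega
      subst h1
      rw [if_pos (by decide), msbBits, List.map_cons]
      norm_num
      decide
    · have hne : ¬ n / 2 = 0 := by omega
      rw [if_neg hne,
        ih (n / 2) (Nat.digitChar (n % 2) :: cs) (by omega)
          (by rw [pow_succ] at hf; omega)]
      conv_rhs => rw [msbBits]
      rw [dif_neg (by omega : ¬ n < 2), List.map_cons]
      have hpc : parseBitChar (Nat.digitChar (n % 2)) = ((n % 2 : Nat) : Int) := by
        have : n % 2 = 0 ∨ n % 2 = 1 := by omega
        rcases this with h | h <;> rw [h] <;> decide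
      rw [hpc]
      simp

lemma alt_eq (n : Nat) (hn : 0 < n) :
    bin_expand_py_alt (n : Int) = (msbBits n).reverse := by
  unfold bin_expand_py_alt
  rw [PySem.List.slice?_none_none_neg_one]
  have h0 : ¬ ((n : Int) < 0) := by omega
  simp only [PySem.Int.toBinChars0b, if_neg h0, Int.toNat_natCast, Option.getD_some]
  rw [show PySem.List.slice ('0' :: 'b' :: Nat.toDigits 2 n) (some 2) none
        = Nat.toDigits 2 n from by simp [pysem]]
  rw [Nat.toDigits,
    toDigitsCore_parse (n + 1) n [] hn
      (lt_of_lt_of_le Nat.lt_two_pow_self (Nat.pow_le_pow_right (by omega) (by omega)))]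
  simp

-- ===== VERDICT (by name: the statement is the Claim_ definition above) =====
theorem bin_expand_py_spec : Claim_equal_bin_expand_py := by
  intro exponent _ hpre
  unfold Spec_bin_expand_py
  obtain ⟨n, rfl⟩ := Int.eq_ofNat_of_zero_le hpre
  rcases Nat.eq_zero_or_pos n with rfl | hn
  · decide
  · rw [alt_eq n hn]
    unfold bin_expand_py
    rw [if_neg (by omega), binLoopA_eq n [] hn, List.nil_append]
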